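-- pv_equiv track=rewrite | github.com/calvinbeighle/revblc | measure.py | delta_records
-- ===== SOURCE A (Python) =====
-- def delta_records(records):
--     """Recompute each entry's addr/old as the delta from the previous entry
--     of the same tag. Equivalent to a coder that maintains per-tag last-value
--     state. Returns a list of (tag, addr_delta, old_delta) triples in original
--     order. The first occurrence of each tag uses the absolute value as delta."""
--     last = {}
--     out = []
--     for tag, addr, old in records:
--         prev_a, prev_o = last.get(tag, (0, 0))
--         out.append((tag, addr - prev_a, old - prev_o))
--         last[tag] = (addr, old)
--     return out
-- ===== SOURCE B (Python) =====
-- def delta_records(records):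
--     """Group records by tag (keeping original indices), delta-encode each
--     group independently, then scatter the encoded triples back to their
--     original positions in a preallocated output list."""
--     groups = {}
--     for i, (tag, addr, old) in enumerate(records):
--         groups.setdefault(tag, []).append((i, addr, old))
--     out = [None] * len(records)
--     for tag, items in groups.items():
--         prev_a, prev_o = 0, 0
--         for i, a, o in items:
--             out[i] = (tag, a - prev_a, o - prev_o)
--             prev_a, prev_o = a, o
--     return out
-- ===== Notes on version B (the rewrite author's own statement) =====
-- stated objective: alternative
-- what changed: Instead of one pass that interleaves a per-tag last-value dict with output appends, B first groups records by tag into (index, addr, old) lists, then delta-encodes each group independently against its own predecessor, and finally scatters the encoded triples into a preallocated output list by stored original index.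
import Mathlib
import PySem

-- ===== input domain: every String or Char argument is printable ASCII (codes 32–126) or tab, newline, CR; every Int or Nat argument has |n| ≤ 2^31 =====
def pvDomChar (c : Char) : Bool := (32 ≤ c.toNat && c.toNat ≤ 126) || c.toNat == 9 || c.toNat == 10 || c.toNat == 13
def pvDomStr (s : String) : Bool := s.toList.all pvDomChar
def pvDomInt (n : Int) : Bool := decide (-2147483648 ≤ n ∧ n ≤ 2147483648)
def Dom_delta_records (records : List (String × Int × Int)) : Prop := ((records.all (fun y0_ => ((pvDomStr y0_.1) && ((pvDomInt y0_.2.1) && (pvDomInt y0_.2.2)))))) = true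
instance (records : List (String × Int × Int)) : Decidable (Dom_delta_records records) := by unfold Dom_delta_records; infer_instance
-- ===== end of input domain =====

-- B groups the records by tag, delta-encodes each group against its own predecessor, and
-- scatters the triples back by original index, instead of A's single pass with a per-tag
-- last-value dict (alternative decomposition, same cost; neither version mutates its argument).

-- ===== PORT A =====
def delta_records (records : List (String × Int × Int)) : List (String × Int × Int) :=
  (records.foldl
    (fun (st : PySem.Dict String (Int × Int) × List (String × Int × Int)) r =>
      let prev := st.1.getD r.1 (0, 0)
      (st.1.insert r.1 r.2, st.2 ++ [(r.1, r.2.1 - prev.1, r.2.2 - prev.2)]))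
    (PySem.Dict.empty, [])).2

-- ===== PORT B =====
-- out[i] = … is PySem.List.pySetD: every index written comes from enumerate, hence is in
-- range, so Python never raises there; the final map unwraps the Option placeholders
-- (Python's None) — every slot has been written, so the default is never reached (proved).
def delta_records_alt (records : List (String × Int × Int)) : List (String × Int × Int) :=
  let groups : PySem.Dict String (List (Int × Int × Int)) :=
    (PySem.List.enumerate records 0).foldl
      (fun d p => d.modify p.2.1 [] (fun l => l ++ [(p.1, p.2.2)]))
      PySem.Dict.empty
  let out0 : List (Option (String × Int × Int)) := List.replicate records.length none
  let out := groups.items.foldl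
    (fun out g =>
      (g.2.foldl
        (fun (st : List (Option (String × Int × Int)) × Int × Int) it =>
          (PySem.List.pySetD st.1 it.1 (some (g.1, it.2.1 - st.2.1, it.2.2 - st.2.2)),
           it.2.1, it.2.2))
        (out, (0 : Int), (0 : Int))).1)
    out0
  out.map (fun x => x.getD ("", 0, 0))

-- ===== PRECONDITION & SPEC =====
def Spec_delta_records (records : List (String × Int × Int)) (out : List (String × Int × Int)) : Prop := out = delta_records_alt records
instance (records : List (String × Int × Int)) (out : List (String × Int × Int)) : Decidable (Spec_delta_records records out) := by unfold Spec_delta_records; infer_instance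

-- ===== CLAIM (what is proved, stated in full; the proofs are below) =====
def Claim_equal_delta_records : Prop := ∀ (records : List (String × Int × Int)), Dom_delta_records records → Spec_delta_records records (delta_records records)

-- ===== LEMMAS AND PROOFS =====


def lastW (t : String) (l : List (String × Int × Int)) : Int × Int :=
  l.foldl (fun acc r => if r.1 == t then (r.2.1, r.2.2) else acc) (0, 0)

def elemv (records : List (String × Int × Int)) (j : Nat) : String × Int × Int :=
  let r := records.getD j ("", 0, 0)
  (r.1, r.2.1 - (lastW r.1 (records.take j)).1, r.2.2 - (lastW r.1 (records.take j)).2)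

def occsE (records : List (String × Int × Int)) (t : String) : List (Int × String × Int × Int) :=
  (PySem.List.enumerate records 0).filter (fun p => p.2.1 == t)

theorem le_fst_of_mem_enumerate {α : Type} (xs : List α) (s : Int) (p : Int × α)
    (h : p ∈ PySem.List.enumerate xs s) : s ≤ p.1 := by
  rw [PySem.List.mem_enumerate_iff] at h
  obtain ⟨k, hk, rfl⟩ := h
  simp

theorem enumerate_take_eq_filter {α : Type} (xs : List α) :
    ∀ (s : Int) (m : Nat),
    (PySem.List.enumerate xs s).take m
      = (PySem.List.enumerate xs s).filter (fun p => decide (p.1 < s + m)) := by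
  induction xs with
  | nil => intro s m; simp [PySem.List.enumerate_nil]
  | cons x xs ih =>
    intro s m
    rw [PySem.List.enumerate_cons]
    cases m with
    | zero =>
      simp only [List.take_zero]
      symm
      rw [List.filter_eq_nil_iff]
      intro p hp
      rcases List.mem_cons.mp hp with rfl | hp
      · simp
      · have := le_fst_of_mem_enumerate xs (s+1) p hp
        simp; omega
    | succ m =>
      simp only [List.take_succ_cons, List.filter_cons]
      rw [if_pos (by simp)]
      congr 1
      rw [ih (s+1) m]
      apply List.filter_congr
      intro p hp
      simp; omega

theorem mem_occsE (records : List (String × Int × Int)) (t : String) (p : Int × String × Int × Int)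
    (h : p ∈ occsE records t) :
    ∃ k : Nat, k < records.length ∧ p = ((k : Int), records.getD k ("", 0, 0))
      ∧ (records.getD k ("", 0, 0)).1 = t := by
  rw [occsE, List.mem_filter, PySem.List.mem_enumerate_iff] at h
  obtain ⟨⟨k, hk, rfl⟩, ht⟩ := h
  exact ⟨k, hk, by simp [List.getD_eq_getElem?_getD, List.getElem?_eq_getElem hk],
    by simpa [List.getD_eq_getElem?_getD, List.getElem?_eq_getElem hk] using ht⟩

theorem pairwise_occsE (records : List (String × Int × Int)) (t : String) :
    (occsE records t).Pairwise (fun p q => p.1 < q.1) :=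
  List.Pairwise.filter _ (PySem.List.pairwise_lt_enumerate records 0)

-- connector: if the occurrence list of t splits at the record with index j, the
-- per-tag state accumulated over `done` is exactly lastW t of the prefix before j
theorem lastW_take_eq (records : List (String × Int × Int)) (t : String)
    (done rest : List (Int × String × Int × Int)) (j : Int) (r : String × Int × Int)
    (h : occsE records t = done ++ (j, r) :: rest) :
    lastW t (records.take j.toNat)
      = done.foldl (fun _ q => (q.2.2.1, q.2.2.2)) ((0:Int), (0:Int)) := by
  have hj0 : 0 ≤ j := by
    have hm : (j, r) ∈ occsE records t := by rw [h]; simp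
    have := le_fst_of_mem_enumerate records 0 _ ((List.mem_filter.mp hm).1)
    simpa using this
  have hpw := pairwise_occsE records t
  rw [h] at hpw
  rw [List.pairwise_append] at hpw
  obtain ⟨hd, hc, hcross⟩ := hpw
  -- (1) records.take j.toNat filtered = done.map (·.2)
  have hfilter : (records.take j.toNat).filter (fun r => r.1 == t) = done.map (·.2) := by
    have h1 : records.take j.toNat = ((PySem.List.enumerate records 0).take j.toNat).map (·.2) := by
      rw [List.map_take, PySem.List.map_snd_enumerate]
    rw [h1, List.filter_map]
    have h2 : ((PySem.List.enumerate records 0).take j.toNat).filter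
        ((fun r => r.1 == t) ∘ (·.2)) = done := by
      rw [enumerate_take_eq_filter]
      have h3 : ∀ (p : Int × String × Int × Int),
          ((fun r => r.1 == t) ∘ (·.2)) p = (fun p => p.2.1 == t) p := fun _ => rfl
      rw [List.filter_congr (fun p _ => h3 p), List.filter_comm]
      have h4 : (PySem.List.enumerate records 0).filter (fun p => p.2.1 == t) = occsE records t := rfl
      rw [h4, h]
      rw [List.filter_append, List.filter_cons]
      have hjj : (decide ((j, r).1 < 0 + (j.toNat : Int))) = false := by simp; omega
      rw [if_neg (by simp; omega)]
      have hrest : rest.filter (fun p => decide (p.1 < 0 + (j.toNat : Int))) = [] := by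
        rw [List.filter_eq_nil_iff]
        intro p hp
        have := List.rel_of_pairwise_cons hc hp
        simp; omega
      have hdone : done.filter (fun p => decide (p.1 < 0 + (j.toNat : Int))) = done := by
        rw [List.filter_eq_self]
        intro p hp
        have := hcross p hp (j, r) (by simp)
        simp; omega
      rw [hrest, hdone, List.append_nil]
    rw [h2]
  -- (2) lastW over filter
  have h5 : lastW t (records.take j.toNat)
      = ((records.take j.toNat).filter (fun r => r.1 == t)).foldl
          (fun _ r => (r.2.1, r.2.2)) ((0:Int), (0:Int)) := by
    rw [lastW, List.foldl_filter]
  rw [h5, hfilter, List.foldl_map]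

theorem inner_fold (records : List (String × Int × Int)) (t : String) :
    ∀ (todo done : List (Int × String × Int × Int)) (out : List (Option (String × Int × Int))),
    occsE records t = done ++ todo → out.length = records.length →
    (((todo.map (fun p => (p.1, p.2.2))).foldl
        (fun (st : List (Option (String × Int × Int)) × Int × Int) it =>
          (PySem.List.pySetD st.1 it.1 (some (t, it.2.1 - st.2.1, it.2.2 - st.2.2)),
           it.2.1, it.2.2))
        (out, done.foldl (fun _ q => (q.2.2.1, q.2.2.2)) ((0:Int), (0:Int)))).1.length
        = records.length)
    ∧ ∀ j : Nat, j < records.length →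
      ((todo.map (fun p => (p.1, p.2.2))).foldl
        (fun (st : List (Option (String × Int × Int)) × Int × Int) it =>
          (PySem.List.pySetD st.1 it.1 (some (t, it.2.1 - st.2.1, it.2.2 - st.2.2)),
           it.2.1, it.2.2))
        (out, done.foldl (fun _ q => (q.2.2.1, q.2.2.2)) ((0:Int), (0:Int)))).1[j]?
        = if ∃ p ∈ todo, p.1 = (j : Int) then some (some (elemv records j)) else out[j]? := by
  intro todo
  induction todo with
  | nil =>
    intro done out h hlen
    refine ⟨hlen, fun j hj => ?_⟩
    simp
  | cons it rest ih =>
    intro done out h hlen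
    have hmem : it ∈ occsE records t := by rw [h]; simp
    obtain ⟨k, hk, hit, htag⟩ := mem_occsE records t it hmem
    have hC := lastW_take_eq records t done rest it.1 it.2 (by rw [h])
    have h1 : it.1.toNat = k := by rw [hit]; simp
    have hval : (t, it.2.2.1 - (done.foldl (fun _ q => (q.2.2.1, q.2.2.2)) ((0:Int),(0:Int))).1,
                    it.2.2.2 - (done.foldl (fun _ q => (q.2.2.1, q.2.2.2)) ((0:Int),(0:Int))).2)
        = elemv records k := by
      simp only [elemv]
      rw [← hC, h1, hit, htag]
    have hset : PySem.List.pySetD out it.1 (some (t,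
        it.2.2.1 - (done.foldl (fun _ q => (q.2.2.1, q.2.2.2)) ((0:Int),(0:Int))).1,
        it.2.2.2 - (done.foldl (fun _ q => (q.2.2.1, q.2.2.2)) ((0:Int),(0:Int))).2))
        = out.set k (some (elemv records k)) := by
      rw [hval, hit]
      exact PySem.List.pySetD_natCast out k _
    have hnext : (done ++ [it]).foldl (fun _ q => (q.2.2.1, q.2.2.2)) ((0:Int), (0:Int))
        = (it.2.2.1, it.2.2.2) := by
      rw [List.foldl_append]; rfl
    have hlen' : (out.set k (some (elemv records k))).length = records.length := by
      simp [hlen]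
    obtain ⟨ihl, ihg⟩ := ih (done ++ [it]) (out.set k (some (elemv records k)))
      (by rw [h, List.append_assoc]; rfl) hlen'
    simp only [List.map_cons, List.foldl_cons]
    constructor
    · rw [hset, ← hnext]
      exact ihl
    · intro j hj
      rw [hset, ← hnext, ihg j hj]
      by_cases hrest : ∃ p ∈ rest, p.1 = (j : Int)
      · obtain ⟨p, hp, hpj⟩ := hrest
        rw [if_pos ⟨p, hp, hpj⟩, if_pos ⟨p, List.mem_cons_of_mem _ hp, hpj⟩]
      · rw [if_neg hrest]
        by_cases hjk : j = k
        · subst hjk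
          rw [if_pos ⟨it, List.mem_cons_self, by rw [hit]⟩]
          rw [List.getElem?_set_self (by omega)]
        · rw [List.getElem?_set_ne (by omega)]
          rw [if_neg ?_]
          rintro ⟨p, hp, hpj⟩
          rcases List.mem_cons.mp hp with rfl | hp
          · rw [hit] at hpj; simp at hpj; omega
          · exact hrest ⟨p, hp, hpj⟩

theorem exists_occsE_iff (records : List (String × Int × Int)) (t : String) (j : Nat)
    (hj : j < records.length) :
    (∃ p ∈ occsE records t, p.1 = (j : Int)) ↔ (records.getD j ("", 0, 0)).1 = t := by
  constructor
  · rintro ⟨p, hp, hpj⟩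
    obtain ⟨k, hk, hpk, htag⟩ := mem_occsE records t p hp
    have : k = j := by rw [hpk] at hpj; simpa using hpj
    subst this; exact htag
  · intro htag
    refine ⟨((j : Int), records.getD j ("", 0, 0)), ?_, rfl⟩
    rw [occsE, List.mem_filter]
    constructor
    · rw [PySem.List.mem_enumerate_iff]
      exact ⟨j, hj, by simp [List.getD_eq_getElem?_getD, List.getElem?_eq_getElem hj]⟩
    · simpa using htag

theorem outer_fold (records : List (String × Int × Int))
    (G : String → List (Int × Int × Int))
    (hG : ∀ t, G t = (occsE records t).map (fun p => (p.1, p.2.2))) :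
    ∀ (ks : List String) (out : List (Option (String × Int × Int))),
    out.length = records.length →
    ((ks.foldl (fun out k =>
        ((G k).foldl
          (fun (st : List (Option (String × Int × Int)) × Int × Int) it =>
            (PySem.List.pySetD st.1 it.1 (some (k, it.2.1 - st.2.1, it.2.2 - st.2.2)),
             it.2.1, it.2.2))
          (out, (0 : Int), (0 : Int))).1) out).length = records.length)
    ∧ ∀ j : Nat, j < records.length →
      (ks.foldl (fun out k =>
        ((G k).foldl
          (fun (st : List (Option (String × Int × Int)) × Int × Int) it =>
            (PySem.List.pySetD st.1 it.1 (some (k, it.2.1 - st.2.1, it.2.2 - st.2.2)),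
             it.2.1, it.2.2))
          (out, (0 : Int), (0 : Int))).1) out)[j]?
        = if (records.getD j ("", 0, 0)).1 ∈ ks then some (some (elemv records j)) else out[j]? := by
  intro ks
  induction ks with
  | nil =>
    intro out hlen
    exact ⟨hlen, fun j hj => by simp⟩
  | cons k ks ih =>
    intro out hlen
    obtain ⟨il, ig⟩ := inner_fold records k (occsE records k) [] out rfl hlen
    rw [← hG k] at il ig
    simp only [List.foldl_nil] at il ig
    simp only [List.foldl_cons]
    obtain ⟨ihl, ihg⟩ := ih _ il
    refine ⟨ihl, fun j hj => ?_⟩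
    rw [ihg j hj, ig j hj]
    simp only [exists_occsE_iff records k j hj]
    by_cases h1 : (records.getD j ("", 0, 0)).1 ∈ ks
    · rw [if_pos h1, if_pos (List.mem_cons_of_mem _ h1)]
    · rw [if_neg h1]
      by_cases h2 : (records.getD j ("", 0, 0)).1 = k
      · rw [if_pos h2, if_pos (by rw [List.mem_cons]; exact Or.inl h2)]
      · rw [if_neg h2, if_neg (by rw [List.mem_cons]; rintro (h | h); exacts [h2 h, h1 h])]

def seqF (p rest : List (String × Int × Int)) : List (String × Int × Int) :=
  match rest with
  | [] => []
  | r :: rs =>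
      (r.1, r.2.1 - (lastW r.1 p).1, r.2.2 - (lastW r.1 p).2) :: seqF (p ++ [r]) rs

theorem seqF_length (rest : List (String × Int × Int)) :
    ∀ p, (seqF p rest).length = rest.length := by
  induction rest with
  | nil => intro p; rfl
  | cons r rs ih => intro p; simp [seqF, ih]

theorem seqF_get? (rest : List (String × Int × Int)) :
    ∀ (p : List (String × Int × Int)) (k : Nat),
    (seqF p rest)[k]? = rest[k]?.map (fun r =>
      (r.1, r.2.1 - (lastW r.1 (p ++ rest.take k)).1, r.2.2 - (lastW r.1 (p ++ rest.take k)).2)) := by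
  induction rest with
  | nil => intro p k; simp [seqF]
  | cons r rs ih =>
    intro p k
    cases k with
    | zero => simp [seqF]
    | succ k => simp [seqF, ih (p ++ [r]) k, List.take_succ_cons]

theorem groups_getD (records : List (String × Int × Int)) (t : String) :
    ((PySem.List.enumerate records 0).foldl
      (fun d p => d.modify p.2.1 [] (fun l => l ++ [(p.1, p.2.2)])) PySem.Dict.empty).getD t []
    = (occsE records t).map (fun p => (p.1, p.2.2)) := by
  have h0 : (PySem.List.enumerate records 0).foldl
      (fun d p => d.modify p.2.1 [] (fun l => l ++ [(p.1, p.2.2)])) PySem.Dict.empty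
      = ((PySem.List.enumerate records 0).map (fun p => (p.2.1, (p.1, p.2.2)))).foldl
          (fun d q => d.modify q.1 [] (fun l => l ++ [q.2])) PySem.Dict.empty := by
    rw [List.foldl_map]
  rw [h0, PySem.Dict.getD_foldl_modify_append, PySem.Dict.getD_empty, List.nil_append,
    List.filter_map, List.map_map]
  rfl

theorem scatter_result (records : List (String × Int × Int))
    (g : PySem.Dict String (List (Int × Int × Int)))
    (hget : ∀ t, g.getD t [] = (occsE records t).map (fun p => (p.1, p.2.2)))
    (hnd : g.keys.Nodup)
    (hcov : ∀ j : Nat, j < records.length → (records.getD j ("", 0, 0)).1 ∈ g.keys) :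
    ((g.items.foldl (fun out gp =>
        (gp.2.foldl
          (fun (st : List (Option (String × Int × Int)) × Int × Int) it =>
            (PySem.List.pySetD st.1 it.1 (some (gp.1, it.2.1 - st.2.1, it.2.2 - st.2.2)),
             it.2.1, it.2.2))
          (out, (0 : Int), (0 : Int))).1)
        (List.replicate records.length (none : Option (String × Int × Int)))).map
        (fun x => x.getD ("", 0, 0)))
      = seqF [] records := by
  rw [PySem.Dict.items_eq_map_keys g hnd [], List.foldl_map]
  obtain ⟨hl, hgj⟩ := outer_fold records (fun k => g.getD k []) hget g.keys
    (List.replicate records.length none) (by simp)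
  apply List.ext_getElem?
  intro j
  rw [List.getElem?_map]
  by_cases hj : j < records.length
  · rw [hgj j hj, if_pos (hcov j hj), seqF_get?, List.nil_append,
      List.getElem?_eq_getElem hj]
    simp [elemv, List.getD_eq_getElem?_getD, List.getElem?_eq_getElem hj]
  · rw [List.getElem?_eq_none (by exact hl.trans_le (by omega)),
        List.getElem?_eq_none (by rw [seqF_length]; omega)]
    rfl

theorem groups_nodup (records : List (String × Int × Int)) :
    ((PySem.List.enumerate records 0).foldl
      (fun d p => d.modify p.2.1 [] (fun l => l ++ [(p.1, p.2.2)])) PySem.Dict.empty).keys.Nodup := by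
  apply PySem.Dict.nodup_keys_foldl_modify_key
  simp [PySem.Dict.keys_empty]

theorem groups_cov (records : List (String × Int × Int)) (j : Nat) (hj : j < records.length) :
    (records.getD j ("", 0, 0)).1 ∈ ((PySem.List.enumerate records 0).foldl
      (fun d p => d.modify p.2.1 [] (fun l => l ++ [(p.1, p.2.2)])) PySem.Dict.empty).keys := by
  rw [PySem.Dict.keys_foldl_modify_key]
  rw [PySem.Dict.keys_empty, PySem.Set.update_nil_left]
  rw [PySem.Set.mem_ofList]
  rw [List.mem_map]
  refine ⟨((j : Int), records.getD j ("", 0, 0)), ?_, rfl⟩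
  rw [PySem.List.mem_enumerate_iff]
  exact ⟨j, hj, by simp [List.getD_eq_getElem?_getD, List.getElem?_eq_getElem hj]⟩

theorem B_eq (records : List (String × Int × Int)) :
    delta_records_alt records = seqF [] records := by
  unfold delta_records_alt
  exact scatter_result records _ (groups_getD records) (groups_nodup records)
    (groups_cov records)
theorem lastW_append (t : String) (l : List (String × Int × Int)) (r : String × Int × Int) :
    lastW t (l ++ [r]) = if r.1 == t then (r.2.1, r.2.2) else lastW t l := by
  simp [lastW, List.foldl_append]

theorem A_fold (rest : List (String × Int × Int)) :
    ∀ (d : PySem.Dict String (Int × Int)) (out p : List (String × Int × Int)),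
    (∀ t, d.getD t (0, 0) = lastW t p) →
    (rest.foldl
      (fun (st : PySem.Dict String (Int × Int) × List (String × Int × Int)) r =>
        let prev := st.1.getD r.1 (0, 0)
        (st.1.insert r.1 r.2, st.2 ++ [(r.1, r.2.1 - prev.1, r.2.2 - prev.2)]))
      (d, out)).2 = out ++ seqF p rest := by
  induction rest with
  | nil => intro d out p _; simp [seqF]
  | cons r rs ih =>
    intro d out p hinv
    simp only [List.foldl_cons, seqF]
    rw [ih (d.insert r.1 r.2) _ (p ++ [r]) ?_]
    · simp [hinv r.1]
    · intro t
      rw [PySem.Dict.getD_insert, lastW_append, hinv t]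
      by_cases h : r.1 = t
      · simp [h]
      · simp [h, Ne.symm h]


theorem A_eq (records : List (String × Int × Int)) :
    delta_records records = seqF [] records := by
  unfold delta_records
  rw [A_fold records PySem.Dict.empty [] []
    (fun t => by rw [PySem.Dict.getD_empty]; rfl)]
  rw [List.nil_append]

-- ===== VERDICT (by name: the statement is the Claim_ definition above) =====
theorem delta_records_spec : Claim_equal_delta_records := by
  intro records _
  unfold Spec_delta_records
  rw [A_eq, B_eq]
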